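-- pv_equiv track=rewrite | github.com/tabtablabs-dev/mfs | src/mfs/state.py | context_key_from_cwd
-- ===== SOURCE A (Python) =====
-- def context_key_from_cwd(cwd: str | None) -> str | None:
--     if not cwd:
--         return None
--     if cwd.startswith("modal://"):
--         parts = [part for part in cwd.removeprefix("modal://").split("/") if part]
--         if len(parts) >= 2:
--             return f"modal/{parts[0]}/{parts[1]}"
--         return None
--     parts = [part for part in cwd.split("/") if part]
--     if len(parts) >= 4 and parts[0] == "Volumes" and parts[1] == "modal":
--         return f"modal/{parts[2]}/{parts[3]}"
--     return None
-- ===== SOURCE B (Python) =====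
-- def _first_segments(s, k):
--     """Return the first k nonempty '/'-separated segments of s, or None
--     if s has fewer than k such segments. Single char-by-char pass with
--     early exit once k segments are found."""
--     segs = []
--     seg = []
--     for ch in s:
--         if ch == "/":
--             if seg:
--                 segs.append("".join(seg))
--                 seg = []
--                 if len(segs) == k:
--                     return segs
--         else:
--             seg.append(ch)
--     if seg:
--         segs.append("".join(seg))
--     return segs if len(segs) == k else None
--
--
-- def context_key_from_cwd(cwd):
--     if not cwd:
--         return None
--     if cwd.startswith("modal://"):
--         segs = _first_segments(cwd[8:], 2)
--         if segs is None:
--             return None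
--         return "modal/" + segs[0] + "/" + segs[1]
--     segs = _first_segments(cwd, 4)
--     if segs is None or segs[0] != "Volumes" or segs[1] != "modal":
--         return None
--     return "modal/" + segs[2] + "/" + segs[3]
-- ===== Notes on version B (the rewrite author's own statement) =====
-- stated objective: alternative
-- what changed: Replaces A's split-on-'/' then filter-empties then index passes with a single character-by-character scan that accumulates nonempty segments and exits as soon as the needed k-th segment is found.
import Mathlib
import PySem

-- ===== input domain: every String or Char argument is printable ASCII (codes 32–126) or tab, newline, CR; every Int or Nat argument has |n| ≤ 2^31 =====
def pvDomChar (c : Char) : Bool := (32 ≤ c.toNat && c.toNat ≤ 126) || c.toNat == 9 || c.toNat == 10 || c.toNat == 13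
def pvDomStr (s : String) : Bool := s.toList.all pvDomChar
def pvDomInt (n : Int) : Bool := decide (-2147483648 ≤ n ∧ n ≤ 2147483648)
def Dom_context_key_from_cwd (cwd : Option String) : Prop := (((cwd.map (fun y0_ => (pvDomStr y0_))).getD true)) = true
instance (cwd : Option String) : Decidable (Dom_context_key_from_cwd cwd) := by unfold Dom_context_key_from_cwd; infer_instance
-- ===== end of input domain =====

-- B replaces A's split-then-filter-then-index passes by a single char-by-char scan
-- that stops at the k-th nonempty segment (objective: alternative decomposition).

-- ===== PORT A =====
-- literal transliteration of A: split on "/", filter out empty parts, index.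
-- cwd.removeprefix("modal://") after the startswith check is exactly dropping 8 chars.
def context_key_from_cwd (cwd : Option String) : Option String :=
  match cwd with
  | none => none
  | some s =>
    if s.toList = [] then none
    else if PySem.Chars.startswith s.toList "modal://".toList then
      if 2 ≤ ((PySem.Chars.splitOn (s.toList.drop 8) ['/']).filter (fun p => !p.isEmpty)).length then
        some (String.ofList ("modal/".toList
          ++ ((PySem.Chars.splitOn (s.toList.drop 8) ['/']).filter (fun p => !p.isEmpty))[0]!
          ++ ['/']
          ++ ((PySem.Chars.splitOn (s.toList.drop 8) ['/']).filter (fun p => !p.isEmpty))[1]!))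
      else none
    else
      if 4 ≤ ((PySem.Chars.splitOn s.toList ['/']).filter (fun p => !p.isEmpty)).length
          ∧ ((PySem.Chars.splitOn s.toList ['/']).filter (fun p => !p.isEmpty))[0]! = "Volumes".toList
          ∧ ((PySem.Chars.splitOn s.toList ['/']).filter (fun p => !p.isEmpty))[1]! = "modal".toList then
        some (String.ofList ("modal/".toList
          ++ ((PySem.Chars.splitOn s.toList ['/']).filter (fun p => !p.isEmpty))[2]!
          ++ ['/']
          ++ ((PySem.Chars.splitOn s.toList ['/']).filter (fun p => !p.isEmpty))[3]!))
      else none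

-- ===== PORT B =====
-- B's helper _first_segments: one pass over the chars, accumulating the current
-- segment (seg) and the finished nonempty segments (segs), early exit at k segments.
def pvSegLoop (k : Nat) : List Char → List (List Char) → List Char → Option (List (List Char))
  | [], segs, seg =>
      let segs' := if !seg.isEmpty then segs ++ [seg] else segs
      if segs'.length = k then some segs' else none
  | c :: rest, segs, seg =>
      if c = '/' then
        if !seg.isEmpty then
          if (segs ++ [seg]).length = k then some (segs ++ [seg])
          else pvSegLoop k rest (segs ++ [seg]) []
        else pvSegLoop k rest segs []
      else pvSegLoop k rest segs (seg ++ [c])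

def context_key_from_cwd_alt (cwd : Option String) : Option String :=
  match cwd with
  | none => none
  | some s =>
    if s.toList = [] then none
    else if PySem.Chars.startswith s.toList "modal://".toList then
      match pvSegLoop 2 (s.toList.drop 8) [] [] with
      | some segs => some (String.ofList ("modal/".toList ++ segs[0]! ++ ['/'] ++ segs[1]!))
      | none => none
    else
      match pvSegLoop 4 s.toList [] [] with
      | some segs =>
        if segs[0]! = "Volumes".toList ∧ segs[1]! = "modal".toList then
          some (String.ofList ("modal/".toList ++ segs[2]! ++ ['/'] ++ segs[3]!))
        else none
      | none => none

-- ===== PRECONDITION & SPEC =====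
def Spec_context_key_from_cwd (cwd : Option String) (out : Option String) : Prop := out = context_key_from_cwd_alt cwd
instance (cwd : Option String) (out : Option String) : Decidable (Spec_context_key_from_cwd cwd out) := by unfold Spec_context_key_from_cwd; infer_instance

-- ===== CLAIM (what is proved, stated in full; the proofs are below) =====
def Claim_equal_context_key_from_cwd : Prop := ∀ (cwd : Option String), Dom_context_key_from_cwd cwd → Spec_context_key_from_cwd cwd (context_key_from_cwd cwd)

-- ===== LEMMAS AND PROOFS =====

-- structural specification of splitting on a single '/'
def pvSplitSlash : List Char → List (List Char)
  | [] => [[]]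
  | c :: cs =>
    if c = '/' then [] :: pvSplitSlash cs
    else
      match pvSplitSlash cs with
      | h :: t => (c :: h) :: t
      | [] => [[c]]   -- unreachable: pvSplitSlash is never []

-- prepend a prefix to the first piece
def pvConsHead (seg : List Char) : List (List Char) → List (List Char)
  | [] => [seg]
  | h :: t => (seg ++ h) :: t

-- the nonempty '/'-segments of seg ++ cs (for '/' ∉ seg)
def pvSegsOf : List Char → List Char → List (List Char)
  | seg, [] => if seg.isEmpty then [] else [seg]
  | seg, c :: cs =>
    if c = '/' then (if seg.isEmpty then pvSegsOf [] cs else seg :: pvSegsOf [] cs)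
    else pvSegsOf (seg ++ [c]) cs

theorem pvSplitSlash_ne_nil (cs : List Char) : pvSplitSlash cs ≠ [] := by
  cases cs with
  | nil => simp [pvSplitSlash]
  | cons c cs =>
    simp only [pvSplitSlash]
    split
    · simp
    · cases h : pvSplitSlash cs <;> simp

theorem pvConsHead_nil (cs : List Char) :
    pvConsHead [] (pvSplitSlash cs) = pvSplitSlash cs := by
  cases h : pvSplitSlash cs with
  | nil => exact absurd h (pvSplitSlash_ne_nil cs)
  | cons a b => simp [pvConsHead]

theorem pvGo_eq (fuel : Nat) (l cur : List Char) (acc : List (List Char))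
    (h : l.length < fuel) :
    PySem.Chars.splitOn.go ['/'] fuel l cur acc
      = acc.reverse ++ pvConsHead cur.reverse (pvSplitSlash l) := by
  induction fuel generalizing l cur acc with
  | zero => omega
  | succ f ih =>
    cases l with
    | nil =>
      simp [PySem.Chars.splitOn.go, pvSplitSlash, pvConsHead]
    | cons c rest =>
      rw [PySem.Chars.splitOn.go]
      by_cases hc : c = '/'
      · subst hc
        have hp : List.isPrefixOf ['/'] ('/' :: rest) = true := by
          simp [List.isPrefixOf]
        rw [if_pos hp]
        rw [ih _ _ _ (by simpa using Nat.lt_of_succ_lt_succ h)]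
        cases hsr : pvSplitSlash rest with
        | nil => exact absurd hsr (pvSplitSlash_ne_nil rest)
        | cons a b => simp [pvSplitSlash, pvConsHead, hsr]
      · have hp : List.isPrefixOf ['/'] (c :: rest) = false := by
          simp [List.isPrefixOf]
          intro hcc; exact hc hcc.symm
        rw [if_neg (by simp [hp])]
        rw [ih _ _ _ (by simpa using Nat.lt_of_succ_lt_succ h)]
        simp only [pvSplitSlash, if_neg hc]
        cases hs : pvSplitSlash rest with
        | nil => exact absurd hs (pvSplitSlash_ne_nil rest)
        | cons hh tt => simp [pvConsHead]

theorem pvSplitOn_eq (cs : List Char) :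
    PySem.Chars.splitOn cs ['/'] = pvSplitSlash cs := by
  unfold PySem.Chars.splitOn
  rw [pvGo_eq _ _ _ _ (by omega)]
  simp only [List.reverse_nil, List.nil_append, pvConsHead_nil]

theorem pvFilter_consHead (cs seg : List Char) :
    (pvConsHead seg (pvSplitSlash cs)).filter (fun p => !p.isEmpty) = pvSegsOf seg cs := by
  induction cs generalizing seg with
  | nil =>
    by_cases h : seg = []
    · subst h; simp [pvSplitSlash, pvConsHead, pvSegsOf, List.filter]
    · have hie : seg.isEmpty = false := by simpa [List.isEmpty_iff] using h
      simp [pvSplitSlash, pvConsHead, pvSegsOf, List.filter, hie]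
  | cons c cs ih =>
    by_cases hc : c = '/'
    · have h2 := ih ([] : List Char)
      rw [pvConsHead_nil cs] at h2
      by_cases h : seg = []
      · subst h
        simp [pvSplitSlash, hc, pvConsHead, pvSegsOf, h2]
      · have hie : seg.isEmpty = false := by simpa [List.isEmpty_iff] using h
        simp [pvSplitSlash, hc, pvConsHead, pvSegsOf, hie, h2]
    · cases h : pvSplitSlash cs with
      | nil => exact absurd h (pvSplitSlash_ne_nil cs)
      | cons hh tt =>
        have h2 := ih (seg ++ [c])
        rw [h] at h2
        simp only [pvSplitSlash, if_neg hc, h, pvSegsOf, pvConsHead, List.filter] at h2 ⊢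
        simpa [List.append_assoc] using h2

theorem pvFilter_split (l : List Char) :
    (PySem.Chars.splitOn l ['/']).filter (fun p => !p.isEmpty) = pvSegsOf [] l := by
  rw [pvSplitOn_eq, ← pvConsHead_nil l]
  exact pvFilter_consHead l []

theorem pvSegLoop_eq (k : Nat) (cs : List Char) (segs : List (List Char)) (seg : List Char)
    (h : segs.length < k) :
    pvSegLoop k cs segs seg
      = (if k ≤ (segs ++ pvSegsOf seg cs).length
         then some ((segs ++ pvSegsOf seg cs).take k) else none) := by
  induction cs generalizing segs seg with
  | nil =>
    by_cases hs : seg.isEmpty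
    · have hne : segs.length ≠ k := Nat.ne_of_lt h
      have hnle : ¬ k ≤ segs.length := Nat.not_le.mpr h
      simp [pvSegLoop, pvSegsOf, hs, hne, hnle]
    · simp only [pvSegLoop, pvSegsOf, hs, Bool.not_false, if_true, Bool.false_eq_true, if_false]
      by_cases he : (segs ++ [seg]).length = k
      · have hk : segs.length + 1 = k := by simpa using he
        simp [hk, List.take_of_length_le (by simp [← hk] : (segs ++ [seg]).length ≤ k)]
      · have hne : segs.length + 1 ≠ k := by simpa using he
        have hnle : ¬ k ≤ segs.length + 1 := by omega
        simp [hne, hnle]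
  | cons c cs ih =>
    by_cases hc : c = '/'
    · subst hc
      by_cases hs : seg.isEmpty
      · rw [show pvSegLoop k ('/' :: cs) segs seg = pvSegLoop k cs segs [] from by
            simp [pvSegLoop, hs]]
        rw [show pvSegsOf seg ('/' :: cs) = pvSegsOf [] cs from by simp [pvSegsOf, hs]]
        exact ih segs [] h
      · rw [show pvSegLoop k ('/' :: cs) segs seg
              = (if (segs ++ [seg]).length = k then some (segs ++ [seg])
                 else pvSegLoop k cs (segs ++ [seg]) []) from by simp [pvSegLoop, hs]]
        rw [show pvSegsOf seg ('/' :: cs) = seg :: pvSegsOf [] cs from by simp [pvSegsOf, hs]]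
        by_cases he : (segs ++ [seg]).length = k
        · rw [if_pos he]
          have hle : k ≤ (segs ++ seg :: pvSegsOf [] cs).length := by
            simp at he ⊢; omega
          rw [if_pos hle]
          have hassoc : segs ++ seg :: pvSegsOf [] cs = (segs ++ [seg]) ++ pvSegsOf [] cs := by
            simp
          rw [hassoc, ← he, List.take_left]
        · have hlt : (segs ++ [seg]).length < k := by simp at he ⊢; omega
          rw [if_neg he, ih (segs ++ [seg]) [] hlt]
          simp
    · rw [show pvSegLoop k (c :: cs) segs seg = pvSegLoop k cs segs (seg ++ [c]) from by
          simp [pvSegLoop, hc]]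
      rw [show pvSegsOf seg (c :: cs) = pvSegsOf (seg ++ [c]) cs from by simp [pvSegsOf, hc]]
      exact ih segs (seg ++ [c]) h

theorem pvTake_getElem! (l : List (List Char)) (k i : Nat) (hik : i < k) (hil : i < l.length) :
    (l.take k)[i]! = l[i]! := by
  have h1 : i < (l.take k).length := by simp [List.length_take]; omega
  simp only [List.getElem!_eq_getElem?_getD]
  rw [List.getElem?_eq_getElem h1, List.getElem?_eq_getElem hil]
  simp [List.getElem_take]

-- ===== VERDICT (by name: the statement is the Claim_ definition above) =====
theorem context_key_from_cwd_spec : Claim_equal_context_key_from_cwd := by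
  unfold Claim_equal_context_key_from_cwd
  intro cwd _
  unfold Spec_context_key_from_cwd
  cases cwd with
  | none => rfl
  | some s =>
    simp only [context_key_from_cwd, context_key_from_cwd_alt]
    by_cases h0 : s.toList = []
    · simp [h0]
    · rw [if_neg h0, if_neg h0]
      by_cases hm : PySem.Chars.startswith s.toList "modal://".toList = true
      · rw [if_pos hm, if_pos hm, pvFilter_split, pvSegLoop_eq 2 _ [] [] (by simp)]
        simp only [List.nil_append]
        by_cases hl : 2 ≤ (pvSegsOf [] (s.toList.drop 8)).length
        · rw [if_pos hl, if_pos hl]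
          have e0 := pvTake_getElem! (pvSegsOf [] (s.toList.drop 8)) 2 0 (by omega) (by omega)
          have e1 := pvTake_getElem! (pvSegsOf [] (s.toList.drop 8)) 2 1 (by omega) (by omega)
          simp [e0, e1]
        · rw [if_neg hl, if_neg hl]
      · rw [if_neg hm, if_neg hm, pvFilter_split, pvSegLoop_eq 4 _ [] [] (by simp)]
        simp only [List.nil_append]
        by_cases hl : 4 ≤ (pvSegsOf [] s.toList).length
        · rw [if_pos hl]
          have e0 := pvTake_getElem! (pvSegsOf [] s.toList) 4 0 (by omega) (by omega)
          have e1 := pvTake_getElem! (pvSegsOf [] s.toList) 4 1 (by omega) (by omega)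
          have e2 := pvTake_getElem! (pvSegsOf [] s.toList) 4 2 (by omega) (by omega)
          have e3 := pvTake_getElem! (pvSegsOf [] s.toList) 4 3 (by omega) (by omega)
          by_cases hv : (pvSegsOf [] s.toList)[0]! = "Volumes".toList
              ∧ (pvSegsOf [] s.toList)[1]! = "modal".toList
          · rw [if_pos ⟨hl, hv.1, hv.2⟩]
            simp [e0, e1, e2, e3, hv.1, hv.2]
          · rw [if_neg (fun hcon => hv ⟨hcon.2.1, hcon.2.2⟩)]
            simp only [e0, e1]
            simp
            intro hV hM
            exact hv (by constructor <;> simp_all)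
        · rw [if_neg (fun hcon => hl hcon.1), if_neg hl]
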